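-- pv_equiv track=rewrite | github.com/Katja-Lebesgue/premium_dashboard | src/feature_extractors/text_analysis_functions.py | has_free_shipping
-- ===== SOURCE A (Python) =====
-- def has_free_shipping(text: str) -> bool:
--     free_shipping_phrases = [
--         "free shipping",
--         "free international shipping",
--         "free domestic shipping",
--         "free delivery",
--         "free international delivery",
--         "free domestic delivery",
--     ]
--     return any([phrase.upper() in text.upper() for phrase in free_shipping_phrases])
-- ===== SOURCE B (Python) =====
-- def has_free_shipping(text: str) -> bool:
--     t = text.upper()
--     for i in range(len(t)):
--         if not t.startswith("FREE ", i):
--             continue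
--         j = i + 5
--         for q in ("INTERNATIONAL ", "DOMESTIC "):
--             if t.startswith(q, j):
--                 j += len(q)
--                 break
--         if t.startswith("SHIPPING", j) or t.startswith("DELIVERY", j):
--             return True
--     return False
-- ===== Notes on version B (the rewrite author's own statement) =====
-- stated objective: alternative
-- what changed: Replaces the six independent whole-text substring searches with a single left-to-right scan that at each position parses the phrases' shared grammar (free-prefix, optional qualifier, shipping-or-delivery tail), one traversal of the text instead of six; in CPython this is not faster because str.__contains__ runs in C.
import Mathlib
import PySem

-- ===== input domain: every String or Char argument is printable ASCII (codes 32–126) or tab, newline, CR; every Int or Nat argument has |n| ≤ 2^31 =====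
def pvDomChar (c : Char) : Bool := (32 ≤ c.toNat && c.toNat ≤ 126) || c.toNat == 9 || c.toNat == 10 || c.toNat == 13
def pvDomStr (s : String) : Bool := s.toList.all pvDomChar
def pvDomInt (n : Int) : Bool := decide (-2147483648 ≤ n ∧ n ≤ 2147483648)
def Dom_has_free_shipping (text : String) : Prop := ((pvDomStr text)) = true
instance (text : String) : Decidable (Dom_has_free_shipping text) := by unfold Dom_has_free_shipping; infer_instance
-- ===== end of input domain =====

-- B replaces A's six whole-text substring searches by one left-to-right scan that parses
-- the shared phrase grammar at each position (objective: alternative; same return value).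

-- ===== PORT A =====
def has_free_shipping (text : String) : Bool :=
  let phrases := ["free shipping", "free international shipping", "free domestic shipping",
                  "free delivery", "free international delivery", "free domestic delivery"]
  (phrases.map (fun p => PySem.Str.isIn (PySem.Str.upper p) (PySem.Str.upper text))).any id

-- ===== PORT B =====
-- does the phrase grammar match at the start of s?
def pvMatchAt (s : List Char) : Bool :=
  if ("FREE ".toList).isPrefixOf s then
    let r := s.drop 5
    let r2 := if ("INTERNATIONAL ".toList).isPrefixOf r then r.drop 14
              else if ("DOMESTIC ".toList).isPrefixOf r then r.drop 9
              else r
    ("SHIPPING".toList).isPrefixOf r2 || ("DELIVERY".toList).isPrefixOf r2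
  else false

-- 'for i in range(len(t))' with startswith-at-i = scan over the suffixes of t
def pvScanFS : List Char → Bool
  | [] => false
  | c :: cs => pvMatchAt (c :: cs) || pvScanFS cs

def has_free_shipping_alt (text : String) : Bool :=
  pvScanFS (PySem.Chars.upper text.toList)

-- ===== PRECONDITION & SPEC =====
def Spec_has_free_shipping (text : String) (out : Bool) : Prop := out = has_free_shipping_alt text
instance (text : String) (out : Bool) : Decidable (Spec_has_free_shipping text out) := by unfold Spec_has_free_shipping; infer_instance

-- ===== CLAIM (what is proved, stated in full; the proofs are below) =====
def Claim_equal_has_free_shipping : Prop := ∀ (text : String), Dom_has_free_shipping text → Spec_has_free_shipping text (has_free_shipping text)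

-- ===== LEMMAS AND PROOFS =====

-- scan finds a match iff some suffix matches
lemma pvScanFS_iff (s : List Char) :
    pvScanFS s = true ↔ ∃ j, pvMatchAt (s.drop j) = true := by
  induction s with
  | nil =>
    simp [pvScanFS]
    decide
  | cons c cs ih =>
    simp [pvScanFS, ih]
    constructor
    · rintro (h | ⟨j, hj⟩)
      · exact ⟨0, h⟩
      · exact ⟨j + 1, hj⟩
    · rintro ⟨j, hj⟩
      cases j with
      | zero => exact Or.inl hj
      | succ j => exact Or.inr ⟨j, hj⟩

-- (a ++ b) is a prefix iff a is and b is, 'a.length' further in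
lemma pfx_app (a b s : List Char) : (a ++ b) <+: s ↔ a <+: s ∧ b <+: s.drop a.length := by
  constructor
  · rintro ⟨t, ht⟩
    subst ht
    exact ⟨⟨b ++ t, by simp⟩, by simp⟩
  · rintro ⟨⟨t, ht⟩, hb⟩
    subst ht
    simp at hb
    obtain ⟨u, hu⟩ := hb
    exact ⟨u, by simp [← hu]⟩

-- two mutually non-prefix words cannot both be prefixes of the same list
lemma no_both {a b r : List Char} (hab : ¬ a <+: b) (hba : ¬ b <+: a)
    (ha : a <+: r) (hb : b <+: r) : False :=
  (List.prefix_or_prefix_of_prefix ha hb).elim hab hba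

lemma pFS (s : List Char) : "FREE SHIPPING".toList <+: s ↔
    "FREE ".toList <+: s ∧ "SHIPPING".toList <+: s.drop 5 := by
  rw [show ("FREE SHIPPING".toList) = "FREE ".toList ++ "SHIPPING".toList from by decide,
    pfx_app, show (("FREE ".toList).length) = 5 from by decide]

lemma pFD (s : List Char) : "FREE DELIVERY".toList <+: s ↔
    "FREE ".toList <+: s ∧ "DELIVERY".toList <+: s.drop 5 := by
  rw [show ("FREE DELIVERY".toList) = "FREE ".toList ++ "DELIVERY".toList from by decide,
    pfx_app, show (("FREE ".toList).length) = 5 from by decide]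

lemma pFIS (s : List Char) : "FREE INTERNATIONAL SHIPPING".toList <+: s ↔
    "FREE ".toList <+: s ∧ "INTERNATIONAL ".toList <+: s.drop 5 ∧ "SHIPPING".toList <+: s.drop 19 := by
  rw [show ("FREE INTERNATIONAL SHIPPING".toList)
        = "FREE ".toList ++ ("INTERNATIONAL ".toList ++ "SHIPPING".toList) from by decide,
    pfx_app, pfx_app, show (("FREE ".toList).length) = 5 from by decide,
    show (("INTERNATIONAL ".toList).length) = 14 from by decide, List.drop_drop]

lemma pFID (s : List Char) : "FREE INTERNATIONAL DELIVERY".toList <+: s ↔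
    "FREE ".toList <+: s ∧ "INTERNATIONAL ".toList <+: s.drop 5 ∧ "DELIVERY".toList <+: s.drop 19 := by
  rw [show ("FREE INTERNATIONAL DELIVERY".toList)
        = "FREE ".toList ++ ("INTERNATIONAL ".toList ++ "DELIVERY".toList) from by decide,
    pfx_app, pfx_app, show (("FREE ".toList).length) = 5 from by decide,
    show (("INTERNATIONAL ".toList).length) = 14 from by decide, List.drop_drop]

lemma pFDS (s : List Char) : "FREE DOMESTIC SHIPPING".toList <+: s ↔
    "FREE ".toList <+: s ∧ "DOMESTIC ".toList <+: s.drop 5 ∧ "SHIPPING".toList <+: s.drop 14 := by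
  rw [show ("FREE DOMESTIC SHIPPING".toList)
        = "FREE ".toList ++ ("DOMESTIC ".toList ++ "SHIPPING".toList) from by decide,
    pfx_app, pfx_app, show (("FREE ".toList).length) = 5 from by decide,
    show (("DOMESTIC ".toList).length) = 9 from by decide, List.drop_drop]

lemma pFDD (s : List Char) : "FREE DOMESTIC DELIVERY".toList <+: s ↔
    "FREE ".toList <+: s ∧ "DOMESTIC ".toList <+: s.drop 5 ∧ "DELIVERY".toList <+: s.drop 14 := by
  rw [show ("FREE DOMESTIC DELIVERY".toList)
        = "FREE ".toList ++ ("DOMESTIC ".toList ++ "DELIVERY".toList) from by decide,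
    pfx_app, pfx_app, show (("FREE ".toList).length) = 5 from by decide,
    show (("DOMESTIC ".toList).length) = 9 from by decide, List.drop_drop]

-- the grammar matcher accepts exactly the six phrases as prefixes
lemma pvMatchAt_iff (s : List Char) :
    pvMatchAt s = true ↔
      ("FREE SHIPPING".toList <+: s ∨ "FREE INTERNATIONAL SHIPPING".toList <+: s ∨
       "FREE DOMESTIC SHIPPING".toList <+: s ∨ "FREE DELIVERY".toList <+: s ∨
       "FREE INTERNATIONAL DELIVERY".toList <+: s ∨ "FREE DOMESTIC DELIVERY".toList <+: s) := by
  rw [pFS, pFIS, pFDS, pFD, pFID, pFDD]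
  simp only [pvMatchAt, List.isPrefixOf_iff_prefix]
  by_cases hF : "FREE ".toList <+: s <;>
    by_cases hI : "INTERNATIONAL ".toList <+: s.drop 5 <;>
      by_cases hD : "DOMESTIC ".toList <+: s.drop 5 <;>
        simp only [hF, hI, hD, if_true, if_false, Bool.or_eq_true,
          List.isPrefixOf_iff_prefix, List.drop_drop, Nat.reduceAdd, true_and,
          false_and, and_false, or_false, false_or]
  -- FREE + INTERNATIONAL + DOMESTIC at the same position: impossible
  · exact (no_both (by decide) (by decide) hI hD).elim
  -- FREE + INTERNATIONAL
  · constructor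
    · rintro (h | h)
      · exact Or.inr (Or.inl h)
      · exact Or.inr (Or.inr (Or.inr h))
    · rintro (h | h | h | h)
      · exact (no_both (by decide) (by decide) hI h).elim
      · exact Or.inl h
      · exact (no_both (by decide) (by decide) hI h).elim
      · exact Or.inr h
  -- FREE + DOMESTIC
  · constructor
    · rintro (h | h)
      · exact Or.inr (Or.inl h)
      · exact Or.inr (Or.inr (Or.inr h))
    · rintro (h | h | h | h)
      · exact (no_both (by decide) (by decide) hD h).elim
      · exact Or.inl h
      · exact (no_both (by decide) (by decide) hD h).elim
      · exact Or.inr h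
  -- no "FREE " at this position
  all_goals simp

-- scanning matches the grammar somewhere iff one of the six phrases occurs as a substring
lemma pvScanFS_isIn (u : List Char) :
    pvScanFS u = true ↔
      (PySem.Chars.isIn ("FREE SHIPPING".toList) u = true ∨
       PySem.Chars.isIn ("FREE INTERNATIONAL SHIPPING".toList) u = true ∨
       PySem.Chars.isIn ("FREE DOMESTIC SHIPPING".toList) u = true ∨
       PySem.Chars.isIn ("FREE DELIVERY".toList) u = true ∨
       PySem.Chars.isIn ("FREE INTERNATIONAL DELIVERY".toList) u = true ∨
       PySem.Chars.isIn ("FREE DOMESTIC DELIVERY".toList) u = true) := by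
  rw [pvScanFS_iff]
  simp only [pvMatchAt_iff, exists_or, PySem.Chars.exists_prefix_drop_iff_isIn]

theorem final_helper (text : String) : has_free_shipping text = has_free_shipping_alt text := by
  rw [Bool.eq_iff_iff]
  unfold has_free_shipping has_free_shipping_alt
  simp only [List.map, List.any_cons, List.any_nil, id, Bool.or_eq_true, Bool.false_eq_true,
    or_false, PySem.Str.isIn_eq, PySem.Str.toList_upper,
    show PySem.Str.upper "free shipping" = "FREE SHIPPING" from by decide,
    show PySem.Str.upper "free international shipping" = "FREE INTERNATIONAL SHIPPING" from by decide,
    show PySem.Str.upper "free domestic shipping" = "FREE DOMESTIC SHIPPING" from by decide,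
    show PySem.Str.upper "free delivery" = "FREE DELIVERY" from by decide,
    show PySem.Str.upper "free international delivery" = "FREE INTERNATIONAL DELIVERY" from by decide,
    show PySem.Str.upper "free domestic delivery" = "FREE DOMESTIC DELIVERY" from by decide]
  rw [pvScanFS_isIn]

-- ===== VERDICT (by name: the statement is the Claim_ definition above) =====
theorem has_free_shipping_spec : Claim_equal_has_free_shipping := by
  intro text _
  unfold Spec_has_free_shipping
  exact final_helper text
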